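-- pv_equiv track=rewrite | github.com/jsga/Algorithms_and_solutions | Codility/8_Dominator.py | solution
-- ===== SOURCE A (Python) =====
-- def solution(A):
--
-- 	N = len(A)
-- 	idx = [] # initialize solution
--
-- 	for i in range(0,N):
-- 		idx_aux = [i] # store temporarily the indexes
--
-- 		# loop over the remaining array
-- 		for j in range(i+1, N):
-- 			if A[i] == A[j]:
-- 				idx_aux.append(j)
--
-- 		# Replace if bigger counting has been found
-- 		if len(idx_aux) > len(idx):
-- 			idx = idx_aux
--
-- 		if len(idx) > (N / 2):  # early stop if found
-- 			return idx[-1]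
--
-- 	if len(idx) > (N / 2):
-- 		return idx[-1]
-- 	else:
-- 		return -1
-- ===== SOURCE B (Python) =====
-- def solution(A):
--     # Boyer-Moore majority vote, then verify the count, then scan for the last index.
--     cand = None
--     cnt = 0
--     for x in A:
--         if cnt == 0:
--             cand = x
--             cnt = 1
--         elif x == cand:
--             cnt += 1
--         else:
--             cnt -= 1
--     if cand is None:
--         return -1
--     if A.count(cand) * 2 <= len(A):
--         return -1
--     for i in range(len(A) - 1, -1, -1):
--         if A[i] == cand:
--             return i
--     return -1
-- ===== Notes on version B (the rewrite author's own statement) =====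
-- stated objective: faster
-- what changed: Replaced the O(N^2) per-index rescanning of the suffix by a single Boyer-Moore majority-vote pass, one count verification and one backward scan for the last index.
import Mathlib
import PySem

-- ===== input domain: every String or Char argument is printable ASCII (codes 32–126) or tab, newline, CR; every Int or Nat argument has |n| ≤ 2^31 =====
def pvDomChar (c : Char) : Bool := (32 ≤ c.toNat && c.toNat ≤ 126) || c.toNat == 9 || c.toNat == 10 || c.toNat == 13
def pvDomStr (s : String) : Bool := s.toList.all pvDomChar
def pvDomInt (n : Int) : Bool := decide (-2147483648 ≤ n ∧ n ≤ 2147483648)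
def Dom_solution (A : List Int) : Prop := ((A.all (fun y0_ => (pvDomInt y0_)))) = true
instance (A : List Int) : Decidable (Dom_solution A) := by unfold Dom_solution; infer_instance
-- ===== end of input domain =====

-- B replaces A's quadratic per-index suffix rescans with a Boyer-Moore majority vote,
-- a count verification and one backward scan for the last index (objective: faster).

-- ===== PORT A =====
-- inner 'for j in range(i+1, N): if A[i] == A[j]: idx_aux.append(j)' starting from idx_aux = [i]
def aAux (A : List Int) (i N : Nat) : List Nat :=
  (List.range' (i+1) (N - (i+1))).foldl
    (fun acc j => if A.getD i 0 = A.getD j 0 then acc ++ [j] else acc) [i]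

-- outer loop over i with early return; 'len(idx) > N/2' on ints is '2*len(idx) > N'
def aLoop (A : List Int) (N : Nat) (i : Nat) (idx : List Nat) : Int :=
  if h : i < N then
    let idxAux := aAux A i N
    let idx' := if idxAux.length > idx.length then idxAux else idx
    if 2 * idx'.length > N then ((idx'.getLast?).getD 0 : Nat)  -- idx[-1]; nonempty here
    else aLoop A N (i+1) idx'
  else if 2 * idx.length > N then ((idx.getLast?).getD 0 : Nat) else -1
termination_by N - i

def solution (A : List Int) : Int := aLoop A A.length 0 []

-- ===== PORT B =====
-- one Boyer-Moore voting step
def bmStep (p : Option Int × Nat) (x : Int) : Option Int × Nat :=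
  if p.2 = 0 then (some x, 1)
  else if some x = p.1 then (p.1, p.2 + 1)
  else (p.1, p.2 - 1)

-- 'for i in range(len(A)-1, -1, -1): if A[i] == cand: return i' (fuel = i+1)
def lastIdx (A : List Int) (m : Int) : Nat → Int
  | 0 => -1
  | i+1 => if A.getD i 0 = m then (i : Int) else lastIdx A m i

def solution_alt (A : List Int) : Int :=
  let p := A.foldl bmStep (none, 0)
  match p.1 with
  | none => -1
  | some c => if 2 * PySem.List.count A c ≤ A.length then -1 else lastIdx A c A.length

-- ===== PRECONDITION & SPEC =====
def Spec_solution (A : List Int) (out : Int) : Prop := out = solution_alt A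
instance (A : List Int) (out : Int) : Decidable (Spec_solution A out) := by unfold Spec_solution; infer_instance

-- ===== CLAIM (what is proved, stated in full; the proofs are below) =====
def Claim_equal_solution : Prop := ∀ (A : List Int), Dom_solution A → Spec_solution A (solution A)

-- ===== LEMMAS AND PROOFS =====

-- Bool test 'index j holds value v'
def pidx (A : List Int) (v : Int) : Nat → Bool := fun j => decide (v = A.getD j 0)

theorem aux_eq_filter (A : List Int) (i : Nat) (h : i < A.length) :
    aAux A i A.length = (List.range' i (A.length - i)).filter (pidx A (A.getD i 0)) := by
  unfold aAux
  have h1 : A.length - i = (A.length - (i+1)) + 1 := by omega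
  rw [h1, List.range'_succ, PySem.List.foldl_append_ite_eq_filter (fun j => A.getD i 0 = A.getD j 0)]
  have hp : pidx A (A.getD i 0) = fun j => decide (A.getD i 0 = A.getD j 0) := rfl
  rw [hp, List.filter_cons]
  simp

theorem countP_pidx_range (A : List Int) (v : Int) :
    (List.range' 0 A.length).countP (pidx A v) = A.count v := by
  have hmap : (List.range' 0 A.length).map (fun j => A.getD j 0) = A := by
    apply List.ext_getElem
    · simp
    · intro k h1 h2
      have hk : k < A.length := by simpa using h2
      simp only [List.getElem_map, List.getElem_range']
      rw [List.getD_eq_getElem _ _ (by simpa using hk)]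
      congr 1
      omega
  calc (List.range' 0 A.length).countP (pidx A v)
      = ((List.range' 0 A.length).map (fun j => A.getD j 0)).countP (fun x => decide (v = x)) := by
        rw [List.countP_map]; rfl
    _ = A.countP (fun x => decide (v = x)) := by rw [hmap]
    _ = A.count v := by
        rw [List.count_eq_countP]
        apply List.countP_congr
        intro x _
        by_cases hvx : v = x
        · simp [hvx]
        · simp [hvx, Ne.symm hvx]

theorem countP_pidx_suffix_le (A : List Int) (v : Int) (i : Nat) (h : i ≤ A.length) :
    (List.range' i (A.length - i)).countP (pidx A v) ≤ A.count v := by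
  have hsplit : List.range' 0 i ++ List.range' i (A.length - i) = List.range' 0 A.length := by
    have := List.range'_append (s := 0) (m := i) (n := A.length - i) (step := 1)
    simpa [Nat.add_sub_cancel' h] using this
  have := countP_pidx_range A v
  rw [← hsplit, List.countP_append] at this
  omega

theorem aux_len_le (A : List Int) (i : Nat) (h : i < A.length) :
    (aAux A i A.length).length ≤ A.count (A.getD i 0) := by
  rw [aux_eq_filter A i h, ← List.countP_eq_length_filter]
  exact countP_pidx_suffix_le A _ i (le_of_lt h)

theorem count_pair_le (A : List Int) (m v : Int) (h : m ≠ v) :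
    A.count m + A.count v ≤ A.length := by
  induction A with
  | nil => simp
  | cons a l ih =>
    simp only [List.count_cons, List.length_cons]
    by_cases hm : a = m <;> by_cases hv : a = v
    · exact absurd (by rw [← hm, hv]) h
    all_goals simp [hm, hv, h, Ne.symm h]; omega

theorem maj_count_le (A : List Int) (m v : Int) (hm : 2 * A.count m > A.length) (h : v ≠ m) :
    2 * A.count v ≤ A.length := by
  have := count_pair_le A m v (Ne.symm h)
  omega

theorem lastIdx_eq (A : List Int) (m : Int) : ∀ n,
    lastIdx A m n = (match ((List.range' 0 n).filter (pidx A m)).getLast? with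
      | some j => (j : Int) | none => -1) := by
  intro n
  induction n with
  | zero => simp [lastIdx]
  | succ n ih =>
    have hcat : List.range' 0 (n+1) = List.range' 0 n ++ [n] := by
      simpa using List.range'_concat (s := 0) (n := n) (step := 1)
    rw [lastIdx, hcat, List.filter_append]
    by_cases h : A.getD n 0 = m
    · have hf : List.filter (pidx A m) [n] = [n] := by
        simp [pidx]
        exact h.symm
      rw [hf, List.getLast?_concat, if_pos h]
    · have : List.filter (pidx A m) [n] = [] := by
        simp [pidx]; intro hh; exact absurd hh.symm h
      rw [this, List.append_nil, if_neg h, ih]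

-- ===== A-side loop characterisation =====

theorem A_noMaj (A : List Int) (h : ∀ v, 2 * A.count v ≤ A.length) :
    ∀ i idx, 2 * idx.length ≤ A.length → aLoop A A.length i idx = -1 := by
  intro i idx hidx
  induction hd : A.length - i generalizing i idx with
  | zero =>
    have hi : ¬ i < A.length := by omega
    rw [aLoop, dif_neg hi, if_neg (by omega)]
  | succ n ih =>
    have hi : i < A.length := by omega
    rw [aLoop, dif_pos hi]
    have haux : 2 * (aAux A i A.length).length ≤ A.length := by
      have := aux_len_le A i hi
      have := h (A.getD i 0)
      omega
    simp only
    set idx' := if (aAux A i A.length).length > idx.length then aAux A i A.length else idx with hidx'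
    have hb : 2 * idx'.length ≤ A.length := by
      rw [hidx']; split <;> omega
    rw [if_neg (by omega)]
    exact ih (i+1) idx' hb (by omega)

theorem A_maj (A : List Int) (m : Int) (hm : 2 * A.count m > A.length) :
    ∀ i idx, (∀ j, j < i → A.getD j 0 ≠ m) → 2 * idx.length ≤ A.length →
      aLoop A A.length i idx = lastIdx A m A.length := by
  intro i idx hpre hidx
  induction hd : A.length - i generalizing i idx with
  | zero =>
    -- i ≥ length and no occurrence before i: count m = 0, contradicting the majority
    exfalso
    have hcount : A.count m = 0 := by
      rw [← countP_pidx_range A m]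
      apply List.countP_eq_zero.mpr
      intro j hj
      have : j < A.length := by simpa using (List.mem_range'_1.mp hj).2
      have := hpre j (by omega)
      simp [pidx]
      intro hh; exact absurd hh.symm this
    omega
  | succ n ih =>
    have hi : i < A.length := by omega
    rw [aLoop, dif_pos hi]
    by_cases hAi : A.getD i 0 = m
    · -- first occurrence of the majority value: the full occurrence list is collected, early return
      have hprefix : (List.range' 0 i).filter (pidx A m) = [] := by
        apply List.filter_eq_nil_iff.mpr
        intro j hj
        have hji : j < i := by simpa using (List.mem_range'_1.mp hj).2
        simp [pidx]
        intro hh; exact absurd hh.symm (hpre j hji)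
      have hsplit : List.range' 0 i ++ List.range' i (A.length - i) = List.range' 0 A.length := by
        have := List.range'_append (s := 0) (m := i) (n := A.length - i) (step := 1)
        simpa [Nat.add_sub_cancel' (le_of_lt hi)] using this
      have hauxF : aAux A i A.length = (List.range' 0 A.length).filter (pidx A m) := by
        rw [aux_eq_filter A i hi, hAi, ← hsplit, List.filter_append, hprefix, List.nil_append]
      have hlen : (aAux A i A.length).length = A.count m := by
        rw [hauxF, ← List.countP_eq_length_filter, countP_pidx_range]
      have hgt : (aAux A i A.length).length > idx.length := by omega
      simp only
      rw [if_pos hgt, if_pos (by omega), lastIdx_eq, ← hauxF]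
      cases hL : (aAux A i A.length).getLast? with
      | none =>
        rw [List.getLast?_eq_none_iff] at hL
        rw [hL] at hlen
        simp at hlen
        omega
      | some j => simp
    · -- value at i is not the majority value: its count is small, no early return
      have hAcnt : 2 * A.count (A.getD i 0) ≤ A.length := maj_count_le A m _ hm hAi
      have haux : 2 * (aAux A i A.length).length ≤ A.length := by
        have := aux_len_le A i hi
        omega
      simp only
      set idx' := if (aAux A i A.length).length > idx.length then aAux A i A.length else idx with hidx'
      have hb : 2 * idx'.length ≤ A.length := by
        rw [hidx']; split <;> omega
      rw [if_neg (by omega)]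
      exact ih (i+1) idx'
        (by intro j hj
            rcases Nat.lt_succ_iff_lt_or_eq.mp hj with h' | h'
            · exact hpre j h'
            · subst h'; exact hAi)
        hb (by omega)

-- ===== B-side: Boyer-Moore invariant =====

def BMInv (p : List Int) (st : Option Int × Nat) : Prop :=
  st.2 ≤ p.length ∧ (st.1 = none → p = []) ∧
    ∀ v, 2 * p.count v ≤ (p.length - st.2) + (if some v = st.1 then 2 * st.2 else 0)

theorem bm_step (p : List Int) (st : Option Int × Nat) (x : Int) (h : BMInv p st) :
    BMInv (p ++ [x]) (bmStep st x) := by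
  obtain ⟨h1, h2, h3⟩ := h
  obtain ⟨c, k⟩ := st
  by_cases hk : k = 0
  · subst hk
    have hstep : bmStep (c, 0) x = (some x, 1) := by simp [bmStep]
    rw [hstep]
    refine ⟨by simp, by simp, ?_⟩
    intro v
    have ht := h3 v
    have hle : 2 * p.count v ≤ p.length := by split_ifs at ht <;> omega
    simp only [List.count_append, List.count_singleton, List.length_append,
      List.length_singleton]
    by_cases hv : v = x
    · subst hv; simp; omega
    · simp [hv, Ne.symm hv]
      omega
  · by_cases hx : some x = c
    · have hstep : bmStep (c, k) x = (c, k + 1) := by simp [bmStep, hk, hx]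
      rw [hstep]
      refine ⟨by simp; omega, ?_, ?_⟩
      · intro hc; simp only at hc; rw [hc] at hx; exact absurd hx (by simp)
      · intro v
        have ht := h3 v
        simp only [List.count_append, List.count_singleton, List.length_append,
          List.length_singleton]
        by_cases hv : some v = c
        · have hvx : v = x := by
            rw [← hx] at hv
            exact Option.some_injective _ hv
          rw [if_pos hv] at ht ⊢
          subst hvx
          simp
          omega
        · rw [if_neg hv] at ht ⊢
          have hvx : ¬ v = x := fun hh => hv (by rw [hh, hx])
          simp [Ne.symm hvx]
          omega
    · have hstep : bmStep (c, k) x = (c, k - 1) := by simp [bmStep, hk, hx]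
      rw [hstep]
      refine ⟨by simp; omega, ?_, ?_⟩
      · intro hc
        have := h2 hc
        subst this
        simp at h1
        omega
      · intro v
        have ht := h3 v
        simp only [List.count_append, List.count_singleton, List.length_append,
          List.length_singleton]
        by_cases hv : some v = c
        · have hvx : ¬ v = x := fun hh => hx (by rw [← hh, hv])
          rw [if_pos hv] at ht ⊢
          simp [Ne.symm hvx]
          omega
        · rw [if_neg hv] at ht ⊢
          by_cases hvx : v = x
          · subst hvx; simp; omega
          · simp [Ne.symm hvx]; omega

theorem bm_fold : ∀ (l p : List Int) (st : Option Int × Nat), BMInv p st →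
    BMInv (p ++ l) (l.foldl bmStep st) := by
  intro l
  induction l with
  | nil => intro p st h; simpa using h
  | cons x l ih =>
    intro p st h
    have := ih (p ++ [x]) (bmStep st x) (bm_step p st x h)
    simpa using this

theorem bm_inv_A (A : List Int) : BMInv A (A.foldl bmStep (none, 0)) := by
  have := bm_fold A [] (none, 0) (⟨by simp, by simp, by intro v; simp⟩)
  simpa using this

theorem B_noMaj (A : List Int) (h : ∀ v, 2 * A.count v ≤ A.length) : solution_alt A = -1 := by
  obtain ⟨h1, h2, h3⟩ := bm_inv_A A
  simp only [solution_alt]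
  cases hc : (A.foldl bmStep (none, 0)).1 with
  | none => rfl
  | some c =>
    simp only [PySem.List.count_eq]
    rw [if_pos (h c)]

theorem B_maj (A : List Int) (m : Int) (hm : 2 * A.count m > A.length) :
    solution_alt A = lastIdx A m A.length := by
  obtain ⟨h1, h2, h3⟩ := bm_inv_A A
  simp only [solution_alt]
  cases hc : (A.foldl bmStep (none, 0)).1 with
  | none =>
    exfalso
    have hA : A = [] := h2 hc
    subst hA
    simp at hm
  | some c =>
    have hcm : c = m := by
      by_contra hne
      have := h3 m
      rw [hc, if_neg (by simp [Ne.symm hne])] at this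
      omega
    subst hcm
    simp only [PySem.List.count_eq]
    rw [if_neg (by omega)]

-- ===== VERDICT (by name: the statement is the Claim_ definition above) =====
theorem solution_spec : Claim_equal_solution := by
  intro A _
  unfold Spec_solution solution
  by_cases h : ∃ v, v ∈ A ∧ 2 * A.count v > A.length
  · obtain ⟨m, _, hc⟩ := h
    rw [A_maj A m hc 0 [] (by intro j hj; omega) (by simp), B_maj A m hc]
  · push Not at h
    have h' : ∀ v, 2 * A.count v ≤ A.length := by
      intro v
      by_cases hv : v ∈ A
      · exact h v hv
      · rw [List.count_eq_zero_of_not_mem hv]; omega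
    rw [A_noMaj A h' 0 [] (by simp), B_noMaj A h']
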